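-- pv_equiv track=rewrite | github.com/pyp-lecture/assignments | Assignment_04/solution/blatt4_solution.py | HelloAgain
-- ===== SOURCE A (Python) =====
-- def HelloAgain(wort):
--     ausgabe = ''
--     for i in wort:
--         if i not in ausgabe:
--             ausgabe += i
--         else:
--             ausgabe=ausgabe+'*'
--     return ausgabe
-- ===== SOURCE B (Python) =====
-- def HelloAgain(wort):
--     first = {}
--     for i, c in enumerate(wort):
--         if c not in first:
--             first[c] = i
--     return ''.join((c if first[c] == i else '*') for i, c in enumerate(wort))
-- ===== Notes on version B (the rewrite author's own statement) =====
-- stated objective: alternative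
-- what changed: Replaces A's single stateful loop (membership test in the growing output string) by two separate phases: build a first-occurrence-index dict once, then a stateless enumerate+map pass comparing each position to that first index.
import Mathlib
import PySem

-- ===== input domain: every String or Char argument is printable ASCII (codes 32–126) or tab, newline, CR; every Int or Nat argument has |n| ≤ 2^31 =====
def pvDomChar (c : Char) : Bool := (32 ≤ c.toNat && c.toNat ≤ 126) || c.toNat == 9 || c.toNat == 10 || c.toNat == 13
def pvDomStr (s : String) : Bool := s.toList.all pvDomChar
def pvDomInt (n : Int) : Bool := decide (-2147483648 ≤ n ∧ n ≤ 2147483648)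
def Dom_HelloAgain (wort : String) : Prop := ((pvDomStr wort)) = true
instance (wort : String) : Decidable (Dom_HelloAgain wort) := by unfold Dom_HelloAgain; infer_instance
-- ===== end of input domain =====

-- B replaces A's single stateful loop (membership test in the growing output) by a
-- first-occurrence-index table built once plus a stateless enumerate+compare pass (objective: alternative).

-- ===== PORT A =====
-- for i in wort: if i not in ausgabe: ausgabe += i else: ausgabe += '*'
def HelloAgainStep (aus : List Char) (c : Char) : List Char :=
  if c ∉ aus then aus ++ [c] else aus ++ ['*']

def HelloAgain (wort : String) : String :=
  String.mk (wort.toList.foldl HelloAgainStep [])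

-- ===== PORT B =====
-- first pass: first[c] = index of first occurrence of c
def HelloAgainFirst (l : List Char) : PySem.Dict Char Int :=
  (PySem.List.enumerate l).foldl
    (fun d p => if !(d.contains p.2) then d.insert p.2 p.1 else d) PySem.Dict.empty

def HelloAgain_alt (wort : String) : String :=
  let first := HelloAgainFirst wort.toList
  String.mk ((PySem.List.enumerate wort.toList).map
    (fun p => if first.getD p.2 (-1) == p.1 then p.2 else '*'))

-- ===== PRECONDITION & SPEC =====
def Spec_HelloAgain (wort : String) (out : String) : Prop := out = HelloAgain_alt wort
instance (wort : String) (out : String) : Decidable (Spec_HelloAgain wort out) := by unfold Spec_HelloAgain; infer_instance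

-- ===== CLAIM (what is proved, stated in full; the proofs are below) =====
def Claim_equal_HelloAgain : Prop := ∀ (wort : String), Dom_HelloAgain wort → Spec_HelloAgain wort (HelloAgain wort)

-- ===== LEMMAS AND PROOFS =====

/-- positional spec: emit c at first occurrence (w.r.t. accumulated `seen`), else '*'. -/
def markAux (seen : List Char) : List Char → List Char
  | [] => []
  | c :: t => (if c ∈ seen then '*' else c) :: markAux (c :: seen) t

theorem markAux_congr (seen seen' : List Char) (l : List Char)
    (h : ∀ c, c ∈ seen ↔ c ∈ seen') : markAux seen l = markAux seen' l := by
  induction l generalizing seen seen' with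
  | nil => rfl
  | cons c t ih =>
    have h1 : (if c ∈ seen then '*' else c) = (if c ∈ seen' then '*' else c) := by
      by_cases hc : c ∈ seen
      · rw [if_pos hc, if_pos ((h c).mp hc)]
      · rw [if_neg hc, if_neg (fun hx => hc ((h c).mpr hx))]
    simp only [markAux, h1]
    exact congrArg _ (ih _ _ (fun d => by simp [List.mem_cons, h d]))

theorem foldl_step_eq_markAux (l : List Char) (aus seen : List Char)
    (h : ∀ d, d ≠ '*' → (d ∈ aus ↔ d ∈ seen)) :
    l.foldl HelloAgainStep aus = aus ++ markAux seen l := by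
  induction l generalizing aus seen with
  | nil => simp [markAux]
  | cons c t ih =>
    have hstep : HelloAgainStep aus c = aus ++ [if c ∈ seen then '*' else c] := by
      unfold HelloAgainStep
      by_cases hc : c = '*'
      · subst hc; by_cases hm : '*' ∈ aus <;> simp [hm]
      · by_cases hm : c ∈ seen
        · rw [if_pos hm, if_neg (by simpa using (h c hc).mpr hm)]
        · rw [if_neg hm, if_pos (by intro hx; exact hm ((h c hc).mp hx))]
    have hinv : ∀ d, d ≠ '*' →
        (d ∈ aus ++ [if c ∈ seen then '*' else c] ↔ d ∈ c :: seen) := by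
      intro d hd
      by_cases hm : c ∈ seen
      · simp only [if_pos hm, List.mem_append, List.mem_cons, List.not_mem_nil, or_false]
        constructor
        · rintro (hx | hx)
          · exact Or.inr ((h d hd).mp hx)
          · exact absurd hx hd
        · rintro (rfl | hx)
          · exact Or.inl ((h d hd).mpr hm)
          · exact Or.inl ((h d hd).mpr hx)
      · simp only [if_neg hm, List.mem_append, List.mem_cons, List.not_mem_nil, or_false]
        rw [h d hd]; tauto
    simp only [List.foldl_cons, hstep, markAux]
    rw [ih _ _ hinv]
    simp

/-- the first-occurrence dict lookup, characterised by `index?`, generalized over the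
    running dict and start index of the enumeration. -/
theorem first_foldl_get? (suf : List Char) (s : Int) (d : PySem.Dict Char Int) (c : Char) :
    (((PySem.List.enumerate suf s).foldl
        (fun d p => if !(d.contains p.2) then d.insert p.2 p.1 else d) d).get? c)
      = (d.get? c).or ((PySem.List.index? suf c).map (fun (k : Nat) => s + (k : Int))) := by
  induction suf generalizing s d with
  | nil =>
    cases hg : d.get? c <;>
      simp [PySem.List.enumerate_nil, PySem.List.index?_eq_idxOf?, Option.or, hg]
  | cons c' t ih =>
    rw [PySem.List.enumerate_cons, List.foldl_cons, ih]
    by_cases hcont : d.contains c' = true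
    · have hstep : (if !(d.contains c') then d.insert c' s else d) = d := by
        rw [hcont]; rfl
      rw [hstep]
      have hc' : (d.get? c').isSome := by
        rw [← PySem.Dict.contains_eq_isSome_get?]; exact hcont
      by_cases hc : c = c'
      · subst hc
        cases hg : d.get? c with
        | none => rw [hg] at hc'; simp at hc'
        | some v => simp [Option.or]
      · rw [PySem.List.index?_cons_of_ne t (show c' ≠ c from fun h => hc h.symm)]
        cases hg : d.get? c with
        | none =>
          simp only [Option.or, Option.map_map]
          cases PySem.List.index? t c with
          | none => rfl
          | some k =>
            simp only [Option.map_some, Function.comp_apply, Option.some.injEq]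
            push_cast; ring
        | some v => simp [Option.or]
    · have hcf : d.contains c' = false := by simpa using hcont
      have hstep : (if !(d.contains c') then d.insert c' s else d) = d.insert c' s := by
        rw [hcf]; rfl
      rw [hstep]
      by_cases hc : c = c'
      · subst hc
        have hg : d.get? c = none := by
          cases hg : d.get? c with
          | none => rfl
          | some v =>
            exfalso; apply hcont
            rw [PySem.Dict.contains_eq_isSome_get?, hg]; rfl
        rw [PySem.Dict.get?_insert_self, hg, PySem.List.index?_cons_self]
        simp [Option.or]
      · rw [PySem.Dict.get?_insert_of_ne _ _ hc,
            PySem.List.index?_cons_of_ne t (show c' ≠ c from fun h => hc h.symm)]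
        cases hg : d.get? c with
        | none =>
          simp only [Option.or, Option.map_map]
          cases PySem.List.index? t c with
          | none => rfl
          | some k =>
            simp only [Option.map_some, Function.comp_apply, Option.some.injEq]
            push_cast; ring
        | some v => simp [Option.or]

theorem first_get? (l : List Char) (c : Char) :
    (HelloAgainFirst l).get? c = (PySem.List.index? l c).map (fun (k : Nat) => (k : Int)) := by
  unfold HelloAgainFirst
  rw [first_foldl_get? l 0 PySem.Dict.empty c]
  simp [Option.or]

theorem index?_append_cons_of_not_mem (pre t : List Char) (c : Char) (h : c ∉ pre) :
    PySem.List.index? (pre ++ c :: t) c = some pre.length := by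
  rw [PySem.List.index?_eq_some_iff]
  exact ⟨pre, t, rfl, rfl, h⟩

theorem map_phase_eq_markAux (suf pre : List Char) (first : PySem.Dict Char Int)
    (hf : ∀ c, first.get? c = (PySem.List.index? (pre ++ suf) c).map (fun (k : Nat) => (k : Int))) :
    (PySem.List.enumerate suf (pre.length : Int)).map
        (fun p => if first.getD p.2 (-1) == p.1 then p.2 else '*')
      = markAux pre suf := by
  induction suf generalizing pre with
  | nil => simp [PySem.List.enumerate_nil, markAux]
  | cons c t ih =>
    rw [PySem.List.enumerate_cons, List.map_cons, markAux]
    congr 1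
    · -- head element
      by_cases hm : c ∈ pre
      · rw [if_pos hm]
        have hex : (PySem.List.index? (pre ++ c :: t) c).isSome :=
          (PySem.List.index?_isSome_iff _ _).mpr (List.mem_append_left _ hm)
        obtain ⟨k, hk'⟩ := Option.isSome_iff_exists.mp hex
        have hklt : k < pre.length := by
          rw [PySem.List.index?_append_of_mem _ hm] at hk'
          obtain ⟨pre1, suf1, heq, hlen, hnm⟩ := (PySem.List.index?_eq_some_iff _ _ _).mp hk'
          subst heq hlen
          simp [List.length_append]
        have hgd : first.getD c (-1) = (k : Int) := by
          rw [PySem.Dict.getD_eq_get?_getD, hf c, hk']; rfl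
        rw [hgd, if_neg]
        simp only [beq_iff_eq, Int.natCast_inj]
        omega
      · rw [if_neg hm]
        have hgd : first.getD c (-1) = (pre.length : Int) := by
          rw [PySem.Dict.getD_eq_get?_getD, hf c, index?_append_cons_of_not_mem _ _ _ hm]; rfl
        rw [hgd, if_pos (by simp)]
    · -- tail
      have hf' : ∀ d, first.get? d =
          (PySem.List.index? ((pre ++ [c]) ++ t) d).map (fun (k : Nat) => (k : Int)) := by
        intro d; rw [hf d]; simp
      have := ih (pre ++ [c]) hf'
      rw [List.length_append, List.length_singleton] at this
      rw [show ((pre.length : Int) + 1) = ((pre.length + 1 : Nat) : Int) by push_cast; ring, this]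
      exact markAux_congr _ _ _ (fun d => by simp [List.mem_append, List.mem_cons, or_comm])

-- ===== VERDICT (by name: the statement is the Claim_ definition above) =====
theorem HelloAgain_spec : Claim_equal_HelloAgain := by
  intro wort _
  unfold Spec_HelloAgain HelloAgain HelloAgain_alt
  congr 1
  rw [foldl_step_eq_markAux wort.toList [] [] (by simp), List.nil_append]
  exact (map_phase_eq_markAux wort.toList [] (HelloAgainFirst wort.toList)
    (fun c => by rw [first_get? _ c]; simp)).symm
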